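-- pv_equiv track=rewrite | github.com/ns-krishnakodali/q-file-share | q-file-share-server/app/quantum_protocols/Untitled-1.py | multiply_matrix_poly_vector
-- ===== SOURCE A (Python) =====
-- from typing import List
--
-- def mod_plus(r: int, alpha: int) -> int:
--     return ((r % alpha) + alpha) % alpha
--
-- def reduce_polynomial(polynomial):
--     N = 4
--     reduced_poly = [0] * N
--     degree = len(polynomial) - 1
--
--     for i, coeff in enumerate(polynomial):
--         index = (degree - i) % N
--         if ((degree - i) // N) % 2 == 0:
--             reduced_poly[index] += coeff
--         else:
--             reduced_poly[index] -= coeff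
--
--     return reduced_poly[::-1]
--
-- def reduced_polynomials_multiplication(polynomial1: List[int], polynomial2: List[int]):
--     return reduce_polynomial(multiply_polynomials(polynomial1, polynomial2))
--
-- def reduce_coefficients_mod_q(polynomial: List[int], q: int) -> List[int]:
--     return [mod_plus(c, q) for c in polynomial]
--
-- def multiply_polynomials(A: List[int], B: List[int]) -> List[int]:
--     max_degree = max(len(A), len(B))
--     if max_degree == 1:
--         return [A[0] * B[0]]
--
--     half = (max_degree + 1) // 2
--     A0, A1 = A[:half], A[half:]
--     B0, B1 = B[:half], B[half:]
--
--     C0 = multiply_polynomials(A0, B0)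
--     C2 = multiply_polynomials(A1, B1)
--     C1 = multiply_polynomials(add_polynomials(A0, A1), add_polynomials(B0, B1))
--
--     middle = subtract_polynomials(subtract_polynomials(C1, C0), C2)
--     result = [0] * (2 * max_degree - 1)
--
--     for i in range(len(C0)):
--         result[i] += C0[i]
--     for i in range(len(middle)):
--         result[i + half] += middle[i]
--     for i in range(len(C2)):
--         result[i + 2 * half] += C2[i]
--
--     return result
--
-- def add_polynomials(polynomial1: List[int], polynomial2: List[int]) -> List[int]:
--     max_length = max(len(polynomial1), len(polynomial2))
--     p1 = polynomial1 + [0] * (max_length - len(polynomial1))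
--     p2 = polynomial2 + [0] * (max_length - len(polynomial2))
--     return [p1[i] + p2[i] for i in range(max_length)]
--
-- def subtract_polynomials(polynomial1: List[int], polynomial2: List[int]) -> List[int]:
--     max_length = max(len(polynomial1), len(polynomial2))
--     p1 = polynomial1 + [0] * (max_length - len(polynomial1))
--     p2 = polynomial2 + [0] * (max_length - len(polynomial2))
--     return [p1[i] - p2[i] for i in range(max_length)]
--
-- def multiply_matrix_poly_vector(matrix, poly_vector, q, transpose=False):
--     res_polynomial = []
--     for i in range(len(matrix)):
--         row_result = reduced_polynomials_multiplication(
--             poly_vector[0], matrix[0][i] if transpose else matrix[i][0]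
--         )
--         for j in range(1, len(matrix[0])):
--             multiplied_polynomial = reduced_polynomials_multiplication(
--                 poly_vector[j], matrix[j][i] if transpose else matrix[i][j]
--             )
--             row_result = reduce_coefficients_mod_q(
--                 add_polynomials(row_result, multiplied_polynomial), q
--             )
--         res_polynomial.append(row_result)
--     return res_polynomial
-- ===== SOURCE B (Python) =====
-- from typing import List
--
-- def mod_plus(r: int, alpha: int) -> int:
--     return ((r % alpha) + alpha) % alpha
--
-- def reduce_polynomial(polynomial):
--     N = 4
--     reduced_poly = [0] * N
--     degree = len(polynomial) - 1
--
--     for i, coeff in enumerate(polynomial):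
--         index = (degree - i) % N
--         if ((degree - i) // N) % 2 == 0:
--             reduced_poly[index] += coeff
--         else:
--             reduced_poly[index] -= coeff
--
--     return reduced_poly[::-1]
--
-- def reduce_coefficients_mod_q(polynomial: List[int], q: int) -> List[int]:
--     return [mod_plus(c, q) for c in polynomial]
--
-- def multiply_polynomials(A: List[int], B: List[int]) -> List[int]:
--     # iterative schoolbook convolution, padded to L = max length so the
--     # product has length 2*L - 1
--     L = max(len(A), len(B))
--     Ap = A + [0] * (L - len(A))
--     Bp = B + [0] * (L - len(B))
--     return [sum(Ap[i] * Bp[k - i] for i in range(k + 1) if i < L and k - i < L)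
--             for k in range(2 * L - 1)]
--
-- def reduced_polynomials_multiplication(polynomial1: List[int], polynomial2: List[int]):
--     return reduce_polynomial(multiply_polynomials(polynomial1, polynomial2))
--
-- def add_polynomials(polynomial1: List[int], polynomial2: List[int]) -> List[int]:
--     max_length = max(len(polynomial1), len(polynomial2))
--     p1 = polynomial1 + [0] * (max_length - len(polynomial1))
--     p2 = polynomial2 + [0] * (max_length - len(polynomial2))
--     return [p1[i] + p2[i] for i in range(max_length)]
--
-- def multiply_matrix_poly_vector(matrix, poly_vector, q, transpose=False):
--     res_polynomial = []
--     for i in range(len(matrix)):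
--         row_result = reduced_polynomials_multiplication(
--             poly_vector[0], matrix[0][i] if transpose else matrix[i][0]
--         )
--         for j in range(1, len(matrix[0])):
--             multiplied_polynomial = reduced_polynomials_multiplication(
--                 poly_vector[j], matrix[j][i] if transpose else matrix[i][j]
--             )
--             row_result = reduce_coefficients_mod_q(
--                 add_polynomials(row_result, multiplied_polynomial), q
--             )
--         res_polynomial.append(row_result)
--     return res_polynomial
-- ===== Notes on version B (the rewrite author's own statement) =====
-- stated objective: simpler
-- what changed: The recursive Karatsuba multiply_polynomials (with its subtract_polynomials helper and three splice-back loops) is replaced by a single iterative schoolbook convolution padded to L = max(len(A), len(B)) so the product keeps length 2*L-1; the matrix-vector loop, reduce_polynomial and the mod-q reduction are unchanged.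
import Mathlib
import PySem

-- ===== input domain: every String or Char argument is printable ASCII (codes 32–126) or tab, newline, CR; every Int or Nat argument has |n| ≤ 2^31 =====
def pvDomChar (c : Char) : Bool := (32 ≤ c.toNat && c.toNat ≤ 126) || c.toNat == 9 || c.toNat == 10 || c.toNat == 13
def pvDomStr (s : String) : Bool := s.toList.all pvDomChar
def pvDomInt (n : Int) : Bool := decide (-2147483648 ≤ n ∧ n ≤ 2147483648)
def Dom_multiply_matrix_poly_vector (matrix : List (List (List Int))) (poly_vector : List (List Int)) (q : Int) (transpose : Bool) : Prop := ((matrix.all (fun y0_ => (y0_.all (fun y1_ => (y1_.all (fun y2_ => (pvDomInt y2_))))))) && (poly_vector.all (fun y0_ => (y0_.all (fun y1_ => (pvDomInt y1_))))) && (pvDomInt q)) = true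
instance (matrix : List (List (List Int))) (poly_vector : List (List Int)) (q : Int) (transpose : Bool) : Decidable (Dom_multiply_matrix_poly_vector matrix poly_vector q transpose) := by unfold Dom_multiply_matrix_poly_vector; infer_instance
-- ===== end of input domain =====

-- B replaces A's recursive Karatsuba polynomial multiplication by an iterative
-- schoolbook convolution (simpler: no recursion, no subtract_polynomials helper);
-- the matrix-vector loop, reduction mod x^4+1 and mod-q code are unchanged.

-- ===== PORT A =====
-- helpers below (mod_plus, reduce_polynomial, add_polynomials, reduce_coefficients_mod_q)
-- are textually identical in A and in B's Source B, so one port serves both sides.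

-- mod_plus(r, alpha) = ((r % alpha) + alpha) % alpha  (Python %; raises on alpha = 0, excluded by Pre_)
def modPlus (r alpha : Int) : Int := PySem.Int.mod (PySem.Int.mod r alpha + alpha) alpha

-- reduce_polynomial: fold over enumerate(polynomial); reduced_poly[::-1] is .reverse
def reducePolynomial (polynomial : List Int) : List Int :=
  let degree : Int := (polynomial.length : Int) - 1
  ((PySem.List.enumerate polynomial 0).foldl (fun rp ic =>
      let idx : Nat := (PySem.Int.mod (degree - ic.1) 4).toNat
      if PySem.Int.mod (PySem.Int.floordiv (degree - ic.1) 4) 2 = 0 then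
        rp.set idx (rp.getD idx 0 + ic.2)
      else
        rp.set idx (rp.getD idx 0 - ic.2))
    [0, 0, 0, 0]).reverse

-- add_polynomials: pad to the max length, add pointwise (p[i] always in range)
def addPolynomials (p1 p2 : List Int) : List Int :=
  let maxLength := max p1.length p2.length
  let a := p1 ++ List.replicate (maxLength - p1.length) (0 : Int)
  let b := p2 ++ List.replicate (maxLength - p2.length) (0 : Int)
  (List.range maxLength).map (fun i => a.getD i 0 + b.getD i 0)

-- subtract_polynomials (A only)
def subPolynomials (p1 p2 : List Int) : List Int :=
  let maxLength := max p1.length p2.length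
  let a := p1 ++ List.replicate (maxLength - p1.length) (0 : Int)
  let b := p2 ++ List.replicate (maxLength - p2.length) (0 : Int)
  (List.range maxLength).map (fun i => a.getD i 0 - b.getD i 0)

def reduceCoefficientsModQ (polynomial : List Int) (q : Int) : List Int :=
  polynomial.map (fun c => modPlus c q)

-- the three 'result[i+off] += src[i]' loops of multiply_polynomials
def addInto : List Int → Nat → List Int → List Int
  | dst, _, [] => dst
  | dst, off, c :: rest => addInto (dst.set off (dst.getD off 0 + c)) (off + 1) rest

-- multiply_polynomials (Karatsuba). Python recursion carries no fuel; the fuel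
-- argument is only a termination guard (on inputs admitted by Pre_ the recursion
-- depth is < fuel, so the guard never fires). A[0]/B[0] on an empty list raises
-- IndexError in Python (excluded by Pre_); getD stands in for it.
def multiplyPolynomials : Nat → List Int → List Int → List Int
  | 0, _, _ => []  -- unreachable under Pre_: Python recurses forever here (RecursionError)
  | fuel + 1, A, B =>
    let maxDegree := max A.length B.length
    if maxDegree = 1 then
      [A.getD 0 0 * B.getD 0 0]
    else
      let half := (maxDegree + 1) / 2
      let A0 := A.take half
      let A1 := A.drop half
      let B0 := B.take half
      let B1 := B.drop half
      let C0 := multiplyPolynomials fuel A0 B0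
      let C2 := multiplyPolynomials fuel A1 B1
      let C1 := multiplyPolynomials fuel (addPolynomials A0 A1) (addPolynomials B0 B1)
      let middle := subPolynomials (subPolynomials C1 C0) C2
      let result := List.replicate (2 * maxDegree - 1) (0 : Int)
      addInto (addInto (addInto result 0 C0) half middle) (2 * half) C2

def reducedPolynomialsMultiplicationA (p1 p2 : List Int) : List Int :=
  reducePolynomial (multiplyPolynomials (max p1.length p2.length) p1 p2)

-- the matrix-vector double loop; list indices are in range under Pre_ (getD stands
-- in for Python's raising indexing there)
def multiply_matrix_poly_vector (matrix : List (List (List Int))) (poly_vector : List (List Int)) (q : Int) (transpose : Bool) : List (List Int) :=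
  (List.range matrix.length).foldl (fun res i =>
    let row0 := reducedPolynomialsMultiplicationA (poly_vector.getD 0 [])
      (if transpose then (matrix.getD 0 []).getD i [] else (matrix.getD i []).getD 0 [])
    let row := (List.range' 1 ((matrix.headD []).length - 1)).foldl (fun r j =>
      reduceCoefficientsModQ (addPolynomials r
        (reducedPolynomialsMultiplicationA (poly_vector.getD j [])
          (if transpose then (matrix.getD j []).getD i [] else (matrix.getD i []).getD j []))) q) row0
    res ++ [row]) []

-- ===== PORT B =====
-- multiply_polynomials in Source B: iterative schoolbook convolution, padded to L
def multiplyPolynomialsSchool (A B : List Int) : List Int :=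
  let L := max A.length B.length
  let Ap := A ++ List.replicate (L - A.length) (0 : Int)
  let Bp := B ++ List.replicate (L - B.length) (0 : Int)
  (List.range (2 * L - 1)).map (fun k =>
    (((List.range (k + 1)).filter (fun i => decide (i < L) && decide (k - i < L))).map
      (fun i => Ap.getD i 0 * Bp.getD (k - i) 0)).sum)

def reducedPolynomialsMultiplicationB (p1 p2 : List Int) : List Int :=
  reducePolynomial (multiplyPolynomialsSchool p1 p2)

def multiply_matrix_poly_vector_alt (matrix : List (List (List Int))) (poly_vector : List (List Int)) (q : Int) (transpose : Bool) : List (List Int) :=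
  (List.range matrix.length).foldl (fun res i =>
    let row0 := reducedPolynomialsMultiplicationB (poly_vector.getD 0 [])
      (if transpose then (matrix.getD 0 []).getD i [] else (matrix.getD i []).getD 0 [])
    let row := (List.range' 1 ((matrix.headD []).length - 1)).foldl (fun r j =>
      reduceCoefficientsModQ (addPolynomials r
        (reducedPolynomialsMultiplicationB (poly_vector.getD j [])
          (if transpose then (matrix.getD j []).getD i [] else (matrix.getD i []).getD j []))) q) row0
    res ++ [row]) []

-- ===== PRECONDITION & SPEC =====
-- Pre_ is exactly where Python A returns normally: all indexing in range
-- (which forces a square matrix in the transpose case), every multiplied pair of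
-- polynomials of equal nonzero length (Karatsuba raises IndexError on unequal
-- lengths and RecursionError on two empty ones), and q ≠ 0 whenever the mod-q
-- branch runs (len(matrix[0]) ≥ 2), else ZeroDivisionError.
def Pre_multiply_matrix_poly_vector (matrix : List (List (List Int))) (poly_vector : List (List Int)) (q : Int) (transpose : Bool) : Prop :=
  matrix = [] ∨
    (1 ≤ (matrix.headD []).length ∧
     (matrix.headD []).length ≤ poly_vector.length ∧
     (2 ≤ (matrix.headD []).length → q ≠ 0) ∧
     (if transpose then
        matrix.length = (matrix.headD []).length ∧
        (∀ j < (matrix.headD []).length, matrix.length ≤ (matrix.getD j []).length) ∧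
        (∀ j < (matrix.headD []).length, ∀ i < matrix.length,
          1 ≤ (poly_vector.getD j []).length ∧
          (poly_vector.getD j []).length = (((matrix.getD j []).getD i [] : List Int)).length)
      else
        (∀ i < matrix.length, (matrix.headD []).length ≤ (matrix.getD i []).length) ∧
        (∀ i < matrix.length, ∀ j < (matrix.headD []).length,
          1 ≤ (poly_vector.getD j []).length ∧
          (poly_vector.getD j []).length = (((matrix.getD i []).getD j [] : List Int)).length)))

instance (matrix : List (List (List Int))) (poly_vector : List (List Int)) (q : Int) (transpose : Bool) : Decidable (Pre_multiply_matrix_poly_vector matrix poly_vector q transpose) := by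
  unfold Pre_multiply_matrix_poly_vector; infer_instance

def pvWitness_multiply_matrix_poly_vector : List (List (List Int)) × List (List Int) × Int × Bool :=
  ([[[1, 2, 3, 4], [0, 1, 0, 1]], [[2, 0, 0, 5], [1, 1, 1, 1]]], [[1, 0, 3, 0], [0, 2, 0, 4]], 17, false)

def Spec_multiply_matrix_poly_vector (matrix : List (List (List Int))) (poly_vector : List (List Int)) (q : Int) (transpose : Bool) (out : List (List Int)) : Prop := out = multiply_matrix_poly_vector_alt matrix poly_vector q transpose
instance (matrix : List (List (List Int))) (poly_vector : List (List Int)) (q : Int) (transpose : Bool) (out : List (List Int)) : Decidable (Spec_multiply_matrix_poly_vector matrix poly_vector q transpose out) := by unfold Spec_multiply_matrix_poly_vector; infer_instance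

-- ===== CLAIM (what is proved, stated in full; the proofs are below) =====
def Claim_equal_multiply_matrix_poly_vector : Prop := ∀ (matrix : List (List (List Int))) (poly_vector : List (List Int)) (q : Int) (transpose : Bool), Dom_multiply_matrix_poly_vector matrix poly_vector q transpose → Pre_multiply_matrix_poly_vector matrix poly_vector q transpose → Spec_multiply_matrix_poly_vector matrix poly_vector q transpose (multiply_matrix_poly_vector matrix poly_vector q transpose)

-- ===== LEMMAS AND PROOFS =====

-- coefficient view of a coefficient list (0 beyond the end)
def cf (A : List Int) (k : Nat) : Int := A.getD k 0

-- shift (multiplication by x^h) of a coefficient function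
def shf (h : Nat) (f : Nat → Int) (k : Nat) : Int := if k < h then 0 else f (k - h)

-- convolution of coefficient functions
def mulFn (f g : Nat → Int) (k : Nat) : Int := ∑ i ∈ Finset.range (k + 1), f i * g (k - i)

theorem cf_out (A : List Int) (k : Nat) (h : A.length ≤ k) : cf A k = 0 :=
  List.getD_eq_default _ _ h

theorem cf_pad (A : List Int) (s : Nat) (k : Nat) :
    cf (A ++ List.replicate s (0 : Int)) k = cf A k := by
  unfold cf
  rcases lt_or_ge k A.length with h | h
  · rw [List.getD_append _ _ _ _ h]
  · rw [List.getD_eq_default _ _ h]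
    rcases lt_or_ge k (A.length + s) with h2 | h2
    · rw [List.getD_append_right _ _ _ _ h]; simp
    · rw [List.getD_eq_default _ _ (by simp; omega)]

theorem cf_map_range (n : Nat) (f : Nat → Int) (k : Nat) :
    cf ((List.range n).map f) k = if k < n then f k else 0 := by
  unfold cf
  rcases lt_or_ge k n with h | h
  · rw [List.getD_eq_getElem _ _ (by simpa using h)]
    simp [h]
  · rw [List.getD_eq_default _ _ (by simpa using h)]
    simp [Nat.not_lt.2 h]

theorem cf_replicate (n k : Nat) : cf (List.replicate n (0 : Int)) k = 0 := by
  unfold cf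
  rcases lt_or_ge k n with h | h
  · simp
  · rw [List.getD_eq_default _ _ (by simpa using h)]

theorem cf_take (A : List Int) (h k : Nat) (hk : k < h) : cf (A.take h) k = cf A k := by
  unfold cf
  rcases lt_or_ge k A.length with h2 | h2
  · rw [List.getD_eq_getElem _ _ (by simp; omega), List.getD_eq_getElem _ _ h2]
    simp [List.getElem_take]
  · rw [List.getD_eq_default _ _ (by simp; omega), List.getD_eq_default _ _ h2]

theorem cf_drop (A : List Int) (h k : Nat) : cf (A.drop h) k = cf A (h + k) := by
  unfold cf
  rcases lt_or_ge (h + k) A.length with h2 | h2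
  · rw [List.getD_eq_getElem _ _ (by simp; omega), List.getD_eq_getElem _ _ h2]
    simp
  · rw [List.getD_eq_default _ _ (by simp; omega), List.getD_eq_default _ _ h2]

theorem cf_split (A : List Int) (h : Nat) (k : Nat) :
    cf A k = cf (A.take h) k + shf h (cf (A.drop h)) k := by
  unfold shf
  rcases lt_or_ge k h with hk | hk
  · rw [cf_take A h k hk, if_pos hk]; ring
  · rw [if_neg (by omega), cf_drop, cf_out (A.take h) k (by simp; omega)]
    rw [Nat.add_sub_cancel' hk]; ring

theorem cf_addPolynomials (p1 p2 : List Int) (k : Nat) :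
    cf (addPolynomials p1 p2) k = cf p1 k + cf p2 k := by
  unfold addPolynomials
  rw [cf_map_range]
  rcases lt_or_ge k (max p1.length p2.length) with h | h
  · rw [if_pos h]
    show cf _ k + cf _ k = _
    rw [cf_pad, cf_pad]
  · rw [if_neg (by omega), cf_out p1 k (by omega), cf_out p2 k (by omega)]; ring

theorem cf_subPolynomials (p1 p2 : List Int) (k : Nat) :
    cf (subPolynomials p1 p2) k = cf p1 k - cf p2 k := by
  unfold subPolynomials
  rw [cf_map_range]
  rcases lt_or_ge k (max p1.length p2.length) with h | h
  · rw [if_pos h]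
    show cf _ k - cf _ k = _
    rw [cf_pad, cf_pad]
  · rw [if_neg (by omega), cf_out p1 k (by omega), cf_out p2 k (by omega)]; ring

theorem length_addPolynomials (p1 p2 : List Int) :
    (addPolynomials p1 p2).length = max p1.length p2.length := by
  simp [addPolynomials]

theorem length_subPolynomials (p1 p2 : List Int) :
    (subPolynomials p1 p2).length = max p1.length p2.length := by
  simp [subPolynomials]

theorem length_addInto (dst : List Int) (off : Nat) (src : List Int) :
    (addInto dst off src).length = dst.length := by
  induction src generalizing dst off with
  | nil => rfl
  | cons c rest ih => simp [addInto, ih]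

theorem cf_set (d : List Int) (i : Nat) (v : Int) (k : Nat) (hi : i < d.length) :
    cf (d.set i v) k = if k = i then v else cf d k := by
  unfold cf
  rcases lt_or_ge k d.length with h2 | h2
  · rw [List.getD_eq_getElem _ _ (by simpa using h2), List.getElem_set]
    split_ifs with e1 e2 e3 <;> try (first | rfl | omega)
    · rw [List.getD_eq_getElem _ _ h2]
  · rw [List.getD_eq_default _ _ (by simpa using h2), List.getD_eq_default _ _ h2]
    rw [if_neg (by omega)]

theorem cf_addInto (dst : List Int) (off : Nat) (src : List Int)
    (h : off + src.length ≤ dst.length) (k : Nat) :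
    cf (addInto dst off src) k = cf dst k + shf off (cf src) k := by
  induction src generalizing dst off with
  | nil =>
    simp only [addInto, shf]
    have h0 : ∀ m, cf ([] : List Int) m = 0 := fun m => rfl
    split_ifs <;> simp [h0]
  | cons c rest ih =>
    simp only [addInto]
    rw [ih _ _ (by simp at h ⊢; omega)]
    rw [cf_set _ _ _ _ (by simp at h; omega)]
    simp only [shf]
    have hcons0 : cf (c :: rest) 0 = c := rfl
    have hconsS : ∀ m, cf (c :: rest) (m + 1) = cf rest m := fun m => rfl
    rcases Nat.lt_trichotomy k off with hk | hk | hk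
    · rw [if_neg (by omega : ¬ k = off), if_pos (by omega : k < off + 1), if_pos hk]
    · subst hk
      simp only [if_pos (Nat.lt_succ_self k), if_neg (Nat.lt_irrefl k),
        Nat.sub_self, hcons0, if_true]
      unfold cf
      ring
    · rw [if_neg (by omega : ¬ k = off), if_neg (by omega : ¬ k < off + 1),
        if_neg (by omega : ¬ k < off), show k - off = (k - (off + 1)) + 1 from by omega, hconsS]

theorem shf_zero (f : Nat → Int) (k : Nat) : shf 0 f k = f k := by
  simp [shf]

theorem shf_congr (h : Nat) (f g : Nat → Int) (hc : ∀ t, f t = g t) (k : Nat) :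
    shf h f k = shf h g k := by
  simp only [shf]
  split_ifs
  · rfl
  · exact hc _

theorem shf_add (h : Nat) (f g : Nat → Int) (k : Nat) :
    shf h (fun t => f t + g t) k = shf h f k + shf h g k := by
  simp only [shf]
  split_ifs <;> ring

theorem mulFn_congr (f f' g g' : Nat → Int) (hf : ∀ t, f t = f' t) (hg : ∀ t, g t = g' t)
    (k : Nat) : mulFn f g k = mulFn f' g' k := by
  unfold mulFn
  exact Finset.sum_congr rfl (fun i _ => by rw [hf, hg])

theorem mulFn_add_left (f g h' : Nat → Int) (k : Nat) :
    mulFn (fun t => f t + g t) h' k = mulFn f h' k + mulFn g h' k := by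
  simp [mulFn, add_mul, Finset.sum_add_distrib]

theorem mulFn_add_right (f g h' : Nat → Int) (k : Nat) :
    mulFn f (fun t => g t + h' t) k = mulFn f g k + mulFn f h' k := by
  simp [mulFn, mul_add, Finset.sum_add_distrib]

theorem mulFn_shf_right (f g : Nat → Int) (h : Nat) (k : Nat) :
    mulFn f (shf h g) k = shf h (mulFn f g) k := by
  unfold mulFn shf
  rcases lt_or_ge k h with hk | hk
  · rw [if_pos hk]
    apply Finset.sum_eq_zero
    intro i hi
    rw [if_pos (by omega)]; ring
  · rw [if_neg (by omega)]
    have hsub : Finset.range (k - h + 1) ⊆ Finset.range (k + 1) := by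
      intro x hx; simp only [Finset.mem_range] at hx ⊢; omega
    have hzero : ∀ i ∈ Finset.range (k + 1), i ∉ Finset.range (k - h + 1) →
        f i * (if k - i < h then 0 else g (k - i - h)) = 0 := by
      intro i hi hni
      simp only [Finset.mem_range] at hi hni
      rw [if_pos (by omega)]; ring
    rw [← Finset.sum_subset hsub hzero]
    apply Finset.sum_congr rfl
    intro i hi
    simp only [Finset.mem_range] at hi
    rw [if_neg (by omega)]
    have e1 : k - i - h = k - h - i := by omega
    rw [e1]

theorem mulFn_shf_left (f g : Nat → Int) (h : Nat) (k : Nat) :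
    mulFn (shf h f) g k = shf h (mulFn f g) k := by
  unfold mulFn shf
  rcases lt_or_ge k h with hk | hk
  · rw [if_pos hk]
    apply Finset.sum_eq_zero
    intro i hi
    simp only [Finset.mem_range] at hi
    rw [if_pos (by omega)]; ring
  · rw [if_neg (by omega)]
    rw [Finset.range_eq_Ico, ← Finset.sum_Ico_consecutive _ (Nat.zero_le h) (by omega : h ≤ k + 1)]
    have h0 : ∑ i ∈ Finset.Ico 0 h, (if i < h then 0 else f (i - h)) * g (k - i) = 0 := by
      apply Finset.sum_eq_zero
      intro i hi
      simp only [Finset.mem_Ico] at hi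
      rw [if_pos (by omega)]; ring
    rw [h0, zero_add, Finset.sum_Ico_eq_sum_range]
    have e0 : k + 1 - h = k - h + 1 := by omega
    rw [e0, Finset.range_eq_Ico]
    apply Finset.sum_congr rfl
    intro i hi
    simp only [Finset.mem_Ico] at hi
    rw [if_neg (by omega)]
    have e1 : h + i - h = i := by omega
    have e2 : k - (h + i) = k - h - i := by omega
    rw [e1, e2]

theorem mulFn_shf_shf (f g : Nat → Int) (h : Nat) (k : Nat) :
    mulFn (shf h f) (shf h g) k = shf (2 * h) (mulFn f g) k := by
  rw [mulFn_shf_left]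
  simp only [shf]
  rcases lt_or_ge k h with hk | hk
  · rw [if_pos hk, if_pos (by omega)]
  · rw [if_neg (by omega), mulFn_shf_right]
    simp only [shf]
    rcases lt_or_ge k (2 * h) with hk2 | hk2
    · rw [if_pos (by omega), if_pos (by omega)]
    · rw [if_neg (by omega), if_neg (by omega)]
      congr 1
      omega

theorem mulFn_out (A B : List Int) (k : Nat) (h : A.length + B.length ≤ k + 1) :
    mulFn (cf A) (cf B) k = 0 := by
  apply Finset.sum_eq_zero
  intro i hi
  simp only [Finset.mem_range] at hi
  by_cases hA : i < A.length
  · rw [cf_out B (k - i) (by omega)]; ring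
  · rw [cf_out A i (by omega)]; ring

-- the Karatsuba identity at the level of coefficient functions
theorem karatsuba_identity (f0 f1 g0 g1 : Nat → Int) (h k : Nat) :
    mulFn (fun t => f0 t + shf h f1 t) (fun t => g0 t + shf h g1 t) k =
      mulFn f0 g0 k
      + shf h (fun t => mulFn (fun s => f0 s + f1 s) (fun s => g0 s + g1 s) t
                        - mulFn f0 g0 t - mulFn f1 g1 t) k
      + shf (2 * h) (mulFn f1 g1) k := by
  have hmid : ∀ t, mulFn (fun s => f0 s + f1 s) (fun s => g0 s + g1 s) t
      - mulFn f0 g0 t - mulFn f1 g1 t = mulFn f0 g1 t + mulFn f1 g0 t := by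
    intro t
    simp only [mulFn_add_left, mulFn_add_right]
    ring
  simp only [hmid]
  rw [mulFn_add_left, mulFn_add_right, mulFn_add_right, mulFn_shf_right, mulFn_shf_left,
      mulFn_shf_shf, shf_add]
  ring

theorem sum_map_filter_eq (l : List Nat) (p : Nat → Bool) (f : Nat → Int) :
    ((l.filter p).map f).sum = (l.map (fun i => if p i then f i else 0)).sum := by
  induction l with
  | nil => rfl
  | cons a t ih =>
    by_cases h : p a <;> simp [h, ih]

-- B's schoolbook convolution computes the convolution, at length 2*L - 1
theorem school_spec (A B : List Int) :
    (multiplyPolynomialsSchool A B).length = 2 * max A.length B.length - 1 ∧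
    ∀ k, cf (multiplyPolynomialsSchool A B) k = mulFn (cf A) (cf B) k := by
  have hA : A.length ≤ max A.length B.length := le_max_left _ _
  have hB : B.length ≤ max A.length B.length := le_max_right _ _
  constructor
  · simp [multiplyPolynomialsSchool]
  · intro k
    simp only [multiplyPolynomialsSchool]
    rw [cf_map_range]
    split_ifs with hk
    · rw [sum_map_filter_eq]
      show ∑ i ∈ Finset.range (k + 1), _ = _
      apply Finset.sum_congr rfl
      intro i hi
      simp only [Finset.mem_range] at hi
      by_cases h1 : i < max A.length B.length
      · by_cases h2 : k - i < max A.length B.length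
        · simp only [h1, h2, decide_true, Bool.and_self, if_true]
          show cf (A ++ _) i * cf (B ++ _) (k - i) = _
          rw [cf_pad, cf_pad]
        · rw [if_neg (by simp [h2]), cf_out B (k - i) (by omega), mul_zero]
      · rw [if_neg (by simp [h1]), cf_out A i (by omega), zero_mul]
    · symm
      apply mulFn_out
      omega

-- A's Karatsuba computes the convolution on equal-length inputs with sufficient fuel
theorem kar_spec (n : Nat) : ∀ (fuel : Nat) (A B : List Int), A.length = n → B.length = n →
    1 ≤ n → n ≤ fuel →
    (multiplyPolynomials fuel A B).length = 2 * n - 1 ∧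
    ∀ k, cf (multiplyPolynomials fuel A B) k = mulFn (cf A) (cf B) k := by
  induction n using Nat.strong_induction_on with
  | _ n IH =>
  intro fuel A B hA hB h1 hf
  obtain ⟨fuel, rfl⟩ : ∃ f', fuel = f' + 1 := ⟨fuel - 1, by omega⟩
  by_cases hn : n = 1
  · subst hn
    obtain ⟨a, rfl⟩ := List.length_eq_one_iff.mp hA
    obtain ⟨b, rfl⟩ := List.length_eq_one_iff.mp hB
    simp only [multiplyPolynomials, List.length_singleton, Nat.max_self]
    refine ⟨rfl, fun k => ?_⟩
    match k with
    | 0 =>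
      show cf [a * b] 0 = _
      simp [mulFn, cf]
    | k + 1 =>
      rw [cf_out _ _ (by simp), mulFn_out _ _ _ (by simp)]
  · -- n ≥ 2
    have hn2 : 2 ≤ n := by omega
    have hmaxn : max A.length B.length = n := by rw [hA, hB, Nat.max_self]
    have hmax1 : ¬ (max A.length B.length = 1) := by omega
    set half := (n + 1) / 2 with hhalf
    have hb1 : 1 ≤ half := by omega
    have hb2 : half < n := by omega
    have hb3 : 1 ≤ n - half := by omega
    have hb4 : n - half ≤ half := by omega
    have hb5 : 3 * half ≤ 2 * n := by omega
    have lA0 : (A.take half).length = half := by simp [hA]; omega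
    have lA1 : (A.drop half).length = n - half := by simp [hA]
    have lB0 : (B.take half).length = half := by simp [hB]; omega
    have lB1 : (B.drop half).length = n - half := by simp [hB]
    have lSA : (addPolynomials (A.take half) (A.drop half)).length = half := by
      rw [length_addPolynomials, lA0, lA1]; omega
    have lSB : (addPolynomials (B.take half) (B.drop half)).length = half := by
      rw [length_addPolynomials, lB0, lB1]; omega
    obtain ⟨lenC0, cfC0⟩ := IH half hb2 fuel (A.take half) (B.take half) lA0 lB0 hb1 (by omega)
    obtain ⟨lenC2, cfC2⟩ := IH (n - half) (by omega) fuel (A.drop half) (B.drop half) lA1 lB1 hb3 (by omega)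
    obtain ⟨lenC1, cfC1⟩ := IH half hb2 fuel (addPolynomials (A.take half) (A.drop half))
        (addPolynomials (B.take half) (B.drop half)) lSA lSB hb1 (by omega)
    set C0 := multiplyPolynomials fuel (A.take half) (B.take half) with hC0
    set C2 := multiplyPolynomials fuel (A.drop half) (B.drop half) with hC2
    set C1 := multiplyPolynomials fuel (addPolynomials (A.take half) (A.drop half))
        (addPolynomials (B.take half) (B.drop half)) with hC1
    have hstep : multiplyPolynomials (fuel + 1) A B =
        addInto (addInto (addInto (List.replicate (2 * n - 1) (0 : Int)) 0 C0) half
          (subPolynomials (subPolynomials C1 C0) C2)) (2 * half) C2 := by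
      simp only [multiplyPolynomials]
      rw [if_neg hmax1, hmaxn]
    rw [hstep]
    have lmid : (subPolynomials (subPolynomials C1 C0) C2).length = 2 * half - 1 := by
      rw [length_subPolynomials, length_subPolynomials, lenC1, lenC0, lenC2]
      omega
    have len1 : (addInto (List.replicate (2 * n - 1) (0 : Int)) 0 C0).length = 2 * n - 1 := by
      rw [length_addInto, List.length_replicate]
    have len2 : (addInto (addInto (List.replicate (2 * n - 1) (0 : Int)) 0 C0) half
        (subPolynomials (subPolynomials C1 C0) C2)).length = 2 * n - 1 := by
      rw [length_addInto, len1]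
    constructor
    · rw [length_addInto, len2]
    · intro k
      rw [cf_addInto _ _ _ (by rw [len2, lenC2]; omega),
          cf_addInto _ _ _ (by rw [len1, lmid]; omega),
          cf_addInto _ _ _ (by rw [List.length_replicate, lenC0]; omega),
          cf_replicate, shf_zero]
      have hmid : ∀ t, cf (subPolynomials (subPolynomials C1 C0) C2) t =
          mulFn (fun s => cf (A.take half) s + cf (A.drop half) s)
                (fun s => cf (B.take half) s + cf (B.drop half) s) t
          - mulFn (cf (A.take half)) (cf (B.take half)) t
          - mulFn (cf (A.drop half)) (cf (B.drop half)) t := by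
        intro t
        rw [cf_subPolynomials, cf_subPolynomials, cfC1, cfC0, cfC2]
        congr 1
        congr 1
        exact mulFn_congr _ _ _ _ (fun s => by rw [cf_addPolynomials])
          (fun s => by rw [cf_addPolynomials]) t
      rw [shf_congr _ _ _ hmid k, cfC0 k]
      have hsplit : mulFn (cf A) (cf B) k =
          mulFn (fun t => cf (A.take half) t + shf half (cf (A.drop half)) t)
                (fun t => cf (B.take half) t + shf half (cf (B.drop half)) t) k :=
        mulFn_congr _ _ _ _ (fun t => cf_split A half t) (fun t => cf_split B half t) k
      rw [hsplit, karatsuba_identity]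
      rw [shf_congr _ _ _ (fun t => cfC2 t) k]
      ring

-- on equal-length nonempty inputs the two polynomial multiplications agree as lists
theorem kar_eq_school (A B : List Int) (h : A.length = B.length) (h1 : 1 ≤ A.length) :
    multiplyPolynomials (max A.length B.length) A B = multiplyPolynomialsSchool A B := by
  obtain ⟨lk, ck⟩ := kar_spec A.length (max A.length B.length) A B rfl h.symm h1 (by omega)
  obtain ⟨ls, cs⟩ := school_spec A B
  have hm : max A.length B.length = A.length := by omega
  apply List.ext_getElem (by rw [lk, ls, hm])
  intro i hi1 hi2
  rw [← List.getD_eq_getElem _ 0 hi1, ← List.getD_eq_getElem _ 0 hi2]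
  show cf _ i = cf _ i
  rw [ck i, cs i]

theorem redmul_eq (p1 p2 : List Int) (h : p1.length = p2.length) (h1 : 1 ≤ p1.length) :
    reducedPolynomialsMultiplicationA p1 p2 = reducedPolynomialsMultiplicationB p1 p2 := by
  unfold reducedPolynomialsMultiplicationA reducedPolynomialsMultiplicationB
  rw [kar_eq_school p1 p2 h h1]

-- ===== VERDICT (by name: the statement is the Claim_ definition above) =====
theorem multiply_matrix_poly_vector_spec : Claim_equal_multiply_matrix_poly_vector := by
  intro matrix poly_vector q transpose _ hpre
  unfold Spec_multiply_matrix_poly_vector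
  unfold multiply_matrix_poly_vector multiply_matrix_poly_vector_alt
  rcases hpre with hnil | ⟨hn1, hnpv, hq, hrest⟩
  · rw [hnil]
    rfl
  · apply PySem.List.foldl_congr_mem
    intro acc i hi
    have hi' : i < matrix.length := List.mem_range.mp hi
    have hmul : ∀ j, j < (matrix.headD []).length →
        reducedPolynomialsMultiplicationA (poly_vector.getD j [])
          (if transpose then (matrix.getD j []).getD i [] else (matrix.getD i []).getD j []) =
        reducedPolynomialsMultiplicationB (poly_vector.getD j [])
          (if transpose then (matrix.getD j []).getD i [] else (matrix.getD i []).getD j []) := by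
      intro j hj
      cases transpose with
      | false =>
        simp only [Bool.false_eq_true, if_false] at hrest ⊢
        obtain ⟨-, hlen⟩ := hrest
        obtain ⟨hge1, heq⟩ := hlen i hi' j hj
        exact redmul_eq _ _ heq hge1
      | true =>
        simp only [if_true] at hrest ⊢
        obtain ⟨-, -, hlen⟩ := hrest
        obtain ⟨hge1, heq⟩ := hlen j hj i hi'
        exact redmul_eq _ _ heq hge1
    dsimp only
    congr 1
    congr 1
    rw [hmul 0 (by omega)]
    apply PySem.List.foldl_congr_mem
    intro r j hj
    have hj' : 1 ≤ j ∧ j < (matrix.headD []).length := by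
      have := List.mem_range'_1.mp hj
      omega
    rw [hmul j hj'.2]
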